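-- pv_equiv track=rewrite | github.com/iptch/advent-of-code-ipt | 2025/NKE/04/main.py | count_accessible
-- ===== SOURCE A (Python) =====
-- DIRECTIONS = [
--     (0, -1),
--     (0, 1),
--     (-1, 0),
--     (1, 0),
--     (1, 1),
--     (-1, -1),
--     (1, -1),
--     (-1, 1)
-- ]
--
-- def count_accessible(grid):
--
--     rows = len(grid)
--     cols = len(grid[0])
--
--     total = 0
--
--     accessible = 0
--
--     for r in range(rows):
--         for c in range(cols):
--             if grid[r][c] != '@':
--                 continue
--
--             neighbor = 0
--
--             for dr, dc in DIRECTIONS: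
--                 ar, ac = r + dr, c + dc
--                 if ar >= 0 and ar < rows and ac >= 0 and ac < cols:
--                     if grid[ar][ac] == '@':
--                         neighbor += 1
--
--             if neighbor < 4:
--                 accessible += 1
--
--     return accessible
-- ===== SOURCE B (Python) =====
-- DIRECTIONS = [
--     (0, -1),
--     (0, 1),
--     (-1, 0),
--     (1, 0),
--     (1, 1),
--     (-1, -1),
--     (1, -1),
--     (-1, 1)
-- ]
--
-- def count_accessible(grid):
--     rows = len(grid)
--     cols = len(grid[0])
--
--     # Pass 1: scatter — every '@' cell pushes one count to each of its 8
--     # neighbor positions; out-of-range positions land on dict keys that the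
--     # second pass never reads.
--     cnt = {}
--     for r in range(rows):
--         for c in range(cols):
--             if grid[r][c] == '@':
--                 for dr, dc in DIRECTIONS:
--                     key = (r + dr, c + dc)
--                     cnt[key] = cnt.get(key, 0) + 1
--
--     # Pass 2: an '@' cell is accessible iff fewer than 4 counts landed on it.
--     accessible = 0
--     for r in range(rows):
--         for c in range(cols):
--             if grid[r][c] == '@' and cnt.get((r, c), 0) < 4:
--                 accessible += 1
--     return accessible
-- ===== Notes on version B (the rewrite author's own statement) =====
-- stated objective: alternative
-- what changed: Replaces A's per-cell gather (recompute the 8-neighbor '@' count at each '@' cell with an in-bounds test per probe) with a two-pass scatter: a first sweep pushes one count from every '@' cell to each of its 8 neighbor positions in a dict count table (no bounds checks needed), and a second sweep counts the '@' cells whose table entry is below 4.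
import Mathlib
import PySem

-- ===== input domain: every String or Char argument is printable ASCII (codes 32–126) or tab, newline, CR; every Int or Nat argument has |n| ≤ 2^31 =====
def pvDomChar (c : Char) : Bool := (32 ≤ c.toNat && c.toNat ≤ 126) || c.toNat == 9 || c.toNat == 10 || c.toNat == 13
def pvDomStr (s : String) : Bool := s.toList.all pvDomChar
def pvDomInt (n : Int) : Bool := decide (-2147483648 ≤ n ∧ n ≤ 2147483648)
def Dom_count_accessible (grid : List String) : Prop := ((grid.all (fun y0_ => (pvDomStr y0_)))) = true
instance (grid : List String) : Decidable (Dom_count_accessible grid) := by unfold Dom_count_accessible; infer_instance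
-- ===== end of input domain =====

-- B replaces A's per-cell gather of the 8-neighbor '@' count by a two-pass scatter into a
-- dict count table (objective: alternative decomposition, same asymptotic cost).

-- ===== PORT A =====
def DIRECTIONS : List (Int × Int) :=
  [(0, -1), (0, 1), (-1, 0), (1, 0), (1, 1), (-1, -1), (1, -1), (-1, 1)]

-- grid[r][c]  (none = IndexError; inside Pre_ every access A performs is in range)
def pyAt (grid : List String) (r c : Int) : Option Char :=
  (PySem.List.pyGet? grid r).bind (fun row => PySem.Str.pyGet? row c)

def count_accessible (grid : List String) : Int :=
  let rows : Int := grid.length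
  let cols : Int := PySem.Str.len ((PySem.List.pyGet? grid 0).getD "")
  let accessible : Int := 0
  (PySem.List.pyRange 0 rows).foldl (fun accessible r =>
    (PySem.List.pyRange 0 cols).foldl (fun accessible c =>
      if pyAt grid r c ≠ some '@' then accessible
      else
        let neighbor : Int := DIRECTIONS.foldl (fun neighbor d =>
          let ar := r + d.1
          let ac := c + d.2
          if ar ≥ 0 ∧ ar < rows ∧ ac ≥ 0 ∧ ac < cols then
            if pyAt grid ar ac = some '@' then neighbor + 1 else neighbor
          else neighbor) 0
        if neighbor < 4 then accessible + 1 else accessible) accessible) accessible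

-- ===== PORT B =====
def count_accessible_alt (grid : List String) : Int :=
  let rows : Int := grid.length
  let cols : Int := PySem.Str.len ((PySem.List.pyGet? grid 0).getD "")
  -- pass 1: every '@' cell pushes one count to each of its 8 neighbor positions
  let cnt : PySem.Dict (Int × Int) Int :=
    (PySem.List.pyRange 0 rows).foldl (fun cnt r =>
      (PySem.List.pyRange 0 cols).foldl (fun cnt c =>
        if pyAt grid r c = some '@' then
          DIRECTIONS.foldl (fun cnt d => cnt.modify (r + d.1, c + d.2) 0 (· + 1)) cnt
        else cnt) cnt) PySem.Dict.empty
  -- pass 2: an '@' cell is accessible iff fewer than 4 counts landed on it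
  (PySem.List.pyRange 0 rows).foldl (fun accessible r =>
    (PySem.List.pyRange 0 cols).foldl (fun accessible c =>
      if pyAt grid r c = some '@' ∧ cnt.getD (r, c) 0 < 4 then accessible + 1
      else accessible) accessible) 0

-- ===== PRECONDITION & SPEC =====
-- Pre_ excludes exactly the inputs where the Python A raises IndexError: the empty grid
-- (len(grid[0])) and grids with a row shorter than the first row (grid[r][c] for c < cols).
def Pre_count_accessible (grid : List String) : Prop :=
  grid ≠ [] ∧ ∀ s ∈ grid, PySem.Str.len (grid.headD "") ≤ PySem.Str.len s
instance (grid : List String) : Decidable (Pre_count_accessible grid) := by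
  unfold Pre_count_accessible; infer_instance

def pvWitness_count_accessible : List String := ["@.@", ".@."]

def Spec_count_accessible (grid : List String) (out : Int) : Prop := out = count_accessible_alt grid
instance (grid : List String) (out : Int) : Decidable (Spec_count_accessible grid out) := by
  unfold Spec_count_accessible; infer_instance

-- ===== CLAIM (what is proved, stated in full; the proofs are below) =====
def Claim_equal_count_accessible : Prop := ∀ (grid : List String), Dom_count_accessible grid → Pre_count_accessible grid → Spec_count_accessible grid (count_accessible grid)

-- ===== LEMMAS AND PROOFS =====

-- indicator: (r, c) is in bounds and holds '@'
def pvHit (grid : List String) (rows cols r c : Int) : Int :=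
  if 0 ≤ r ∧ r < rows ∧ 0 ≤ c ∧ c < cols ∧ pyAt grid r c = some '@' then 1 else 0

-- the multiset of positions pass 1 of B pushes counts to
def pvPieces (grid : List String) (n m : Nat) : List (Int × Int) :=
  (List.range n).flatMap (fun (i : Nat) =>
    (List.range m).flatMap (fun (j : Nat) =>
      if pyAt grid (i : Int) (j : Int) = some '@' then
        DIRECTIONS.map (fun d => ((i : Int) + d.1, (j : Int) + d.2))
      else []))

-- 1D point sum
lemma pvSum1 (m : Nat) (v : Int) (Q : Int → Prop) [DecidablePred Q] :
    (∑ j ∈ Finset.range m, (if Q (j : Int) ∧ (j : Int) = v then (1 : Int) else 0))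
      = if 0 ≤ v ∧ v < (m : Int) ∧ Q v then 1 else 0 := by
  induction m with
  | zero => simp; intro h; omega
  | succ m ih =>
      rw [Finset.sum_range_succ, ih]
      by_cases hv : (m : Int) = v
      · subst hv
        rw [if_neg (show ¬(0 ≤ (m : Int) ∧ (m : Int) < (m : Int) ∧ Q (m : Int)) from
              by rintro ⟨-, h, -⟩; omega)]
        by_cases hq : Q (m : Int)
        · rw [if_pos (show Q (m : Int) ∧ (m : Int) = (m : Int) from ⟨hq, rfl⟩),
              if_pos (show 0 ≤ (m : Int) ∧ (m : Int) < ((m + 1 : Nat) : Int) ∧ Q (m : Int) from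
                ⟨by omega, by push_cast; omega, hq⟩)]
          ring
        · rw [if_neg (show ¬(Q (m : Int) ∧ (m : Int) = (m : Int)) from fun h => hq h.1),
              if_neg (show ¬(0 ≤ (m : Int) ∧ (m : Int) < ((m + 1 : Nat) : Int) ∧ Q (m : Int)) from
                fun h => hq h.2.2)]
          ring
      · rw [if_neg (show ¬(Q (m : Int) ∧ (m : Int) = v) from fun h => hv h.2)]
        by_cases h2 : 0 ≤ v ∧ v < (m : Int) ∧ Q v
        · rw [if_pos h2, if_pos (show 0 ≤ v ∧ v < ((m + 1 : Nat) : Int) ∧ Q v from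
            ⟨h2.1, by have := h2.2.1; push_cast; omega, h2.2.2⟩)]
          ring
        · rw [if_neg h2, if_neg (show ¬(0 ≤ v ∧ v < ((m + 1 : Nat) : Int) ∧ Q v) from
            by rintro ⟨a1, a2, a3⟩; exact h2 ⟨a1, by push_cast at a2 ⊢; omega, a3⟩)]
          ring

-- 2D point sum
lemma pvSum2 (n m : Nat) (u v : Int) (P : Int → Int → Prop) [∀ a b, Decidable (P a b)] :
    (∑ i ∈ Finset.range n, ∑ j ∈ Finset.range m,
        (if P (i : Int) (j : Int) ∧ (i : Int) = u ∧ (j : Int) = v then (1 : Int) else 0))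
      = if 0 ≤ u ∧ u < (n : Int) ∧ 0 ≤ v ∧ v < (m : Int) ∧ P u v then 1 else 0 := by
  induction n with
  | zero => simp; intro h; omega
  | succ n ih =>
      rw [Finset.sum_range_succ, ih]
      by_cases hu : (n : Int) = u
      · subst hu
        rw [if_neg (by rintro ⟨-, h, -⟩; omega)]
        have hrow : (∑ j ∈ Finset.range m,
            (if P (n : Int) (j : Int) ∧ (n : Int) = (n : Int) ∧ (j : Int) = v then (1 : Int) else 0))
              = if 0 ≤ v ∧ v < (m : Int) ∧ P (n : Int) v then 1 else 0 := by
          rw [← pvSum1 m v (fun w => P (n : Int) w)]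
          apply Finset.sum_congr rfl
          intro j _
          congr 1
          simp only [eq_iff_iff]
          tauto
        rw [hrow]
        by_cases h2 : 0 ≤ v ∧ v < (m : Int) ∧ P (n : Int) v
        · rw [if_pos h2, if_pos ⟨by omega, by push_cast; omega, h2⟩]; ring
        · rw [if_neg h2, if_neg (fun h => h2 ⟨h.2.2.1, h.2.2.2.1, h.2.2.2.2⟩)]; ring
      · have hrow : (∑ j ∈ Finset.range m,
            (if P (n : Int) (j : Int) ∧ (n : Int) = u ∧ (j : Int) = v then (1 : Int) else 0)) = 0 := by
          apply Finset.sum_eq_zero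
          intro j _
          exact if_neg (fun h => hu h.2.1)
        rw [hrow]
        by_cases h2 : 0 ≤ u ∧ u < (n : Int) ∧ 0 ≤ v ∧ v < (m : Int) ∧ P u v
        · rw [if_pos h2, if_pos ⟨h2.1, by have := h2.2.1; push_cast; omega, h2.2.2⟩]; ring
        · rw [if_neg h2, if_neg (by rintro ⟨a1, a2, a3⟩; exact h2 ⟨a1, by push_cast at a2 ⊢; omega, a3⟩)]; ring

-- swap a list-indexed sum out of a Finset sum
lemma pvSumSwap {α β : Type} (l : List α) (s : Finset β) (f : β → α → Int) :
    (∑ i ∈ s, (l.map (f i)).sum) = (l.map (fun a => ∑ i ∈ s, f i a)).sum := by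
  induction l with
  | nil => simp
  | cons x t ih => simp [Finset.sum_add_distrib, ih]

-- list-range sums are Finset.range sums
lemma pvListSumRange (n : Nat) (f : Nat → Int) :
    ((List.range n).map f).sum = ∑ i ∈ Finset.range n, f i := rfl

-- landings of one source cell at (x, y)
lemma pvCell (grid : List String) (i j : Nat) (x y : Int) :
    ((List.count ((x, y))
        (if pyAt grid (i : Int) (j : Int) = some '@' then
          DIRECTIONS.map (fun d => ((i : Int) + d.1, (j : Int) + d.2))
        else []) : Nat) : Int)
      = (DIRECTIONS.map (fun d =>
          if pyAt grid (i : Int) (j : Int) = some '@' ∧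
              ((i : Int) = x - d.1 ∧ (j : Int) = y - d.2) then (1 : Int) else 0)).sum := by
  by_cases hP : pyAt grid (i : Int) (j : Int) = some '@'
  · rw [if_pos hP, List.count_eq_countP, List.countP_map]
    simp only [Function.comp_def]
    rw [← PySem.List.sum_map_ite_one_zero (fun d : Int × Int =>
            (((i : Int) + d.1, (j : Int) + d.2) == ((x, y) : Int × Int))) DIRECTIONS]
    apply congrArg List.sum
    apply List.map_congr_left
    intro d _
    have hiff : ((((i : Int) + d.1, (j : Int) + d.2) == ((x, y) : Int × Int)) = true)
        ↔ ((i : Int) = x - d.1 ∧ (j : Int) = y - d.2) := by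
      simp only [beq_iff_eq, Prod.mk.injEq]
      constructor <;> intro h <;> omega
    rw [if_congr hiff rfl rfl]
    exact if_congr (and_iff_right hP).symm rfl rfl
  · simp [hP]

-- B's count table, read at any position, is the gather sum with negated offsets
lemma pvScatter (grid : List String) (n m : Nat) (x y : Int) :
    ((List.range n).foldl (fun cnt (i : Nat) =>
        (List.range m).foldl (fun cnt (j : Nat) =>
          if pyAt grid (i : Int) (j : Int) = some '@' then
            DIRECTIONS.foldl
              (fun cnt d => cnt.modify ((i : Int) + d.1, (j : Int) + d.2) 0 (· + 1)) cnt
          else cnt) cnt) (PySem.Dict.empty : PySem.Dict (Int × Int) Int)).getD (x, y) 0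
      = (DIRECTIONS.map (fun d => pvHit grid (n : Int) (m : Int) (x - d.1) (y - d.2))).sum := by
  -- pass 1 is one flat scatter over pvPieces
  have h1 : ((List.range n).foldl (fun cnt (i : Nat) =>
        (List.range m).foldl (fun cnt (j : Nat) =>
          if pyAt grid (i : Int) (j : Int) = some '@' then
            DIRECTIONS.foldl
              (fun cnt d => cnt.modify ((i : Int) + d.1, (j : Int) + d.2) 0 (· + 1)) cnt
          else cnt) cnt) (PySem.Dict.empty : PySem.Dict (Int × Int) Int))
      = (pvPieces grid n m).foldl (fun cnt k => cnt.modify k 0 (· + 1)) PySem.Dict.empty := by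
    simp only [pvPieces, List.foldl_flatMap]
    apply PySem.List.foldl_congr_mem
    intro acc i _
    apply PySem.List.foldl_congr_mem
    intro acc2 j _
    by_cases hP : pyAt grid (i : Int) (j : Int) = some '@'
    · rw [if_pos hP, if_pos hP, List.foldl_map]
    · rw [if_neg hP, if_neg hP]; rfl
  rw [h1, PySem.Dict.getD_foldl_modify_add_one]
  have hempty : (PySem.Dict.empty : PySem.Dict (Int × Int) Int).getD (x, y) 0 = 0 := rfl
  rw [hempty, zero_add]
  -- count the landings at (x, y), cell by cell
  have hc : ((List.count ((x, y)) (pvPieces grid n m) : Nat) : Int)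
      = ∑ i ∈ Finset.range n, ∑ j ∈ Finset.range m,
          (DIRECTIONS.map (fun d =>
            if pyAt grid (i : Int) (j : Int) = some '@' ∧
                ((i : Int) = x - d.1 ∧ (j : Int) = y - d.2) then (1 : Int) else 0)).sum := by
    simp only [pvPieces, List.count_flatMap, Function.comp_def]
    rw [Nat.cast_list_sum, List.map_map, ← pvListSumRange]
    apply congrArg List.sum
    apply List.map_congr_left
    intro i _
    simp only [Function.comp_def]
    rw [Nat.cast_list_sum, List.map_map, ← pvListSumRange]
    apply congrArg List.sum
    apply List.map_congr_left
    intro j _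
    exact pvCell grid i j x y
  rw [hc]
  -- pull the direction sum outside
  have hswap : (∑ i ∈ Finset.range n, ∑ j ∈ Finset.range m,
      (DIRECTIONS.map (fun d =>
        if pyAt grid (i : Int) (j : Int) = some '@' ∧
            ((i : Int) = x - d.1 ∧ (j : Int) = y - d.2) then (1 : Int) else 0)).sum)
      = (DIRECTIONS.map (fun d => ∑ i ∈ Finset.range n, ∑ j ∈ Finset.range m,
          if pyAt grid (i : Int) (j : Int) = some '@' ∧
              ((i : Int) = x - d.1 ∧ (j : Int) = y - d.2) then (1 : Int) else 0)).sum := by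
    rw [← pvSumSwap]
    apply Finset.sum_congr rfl
    intro i _
    rw [← pvSumSwap]
  rw [hswap]
  apply congrArg List.sum
  apply List.map_congr_left
  intro d _
  exact pvSum2 n m (x - d.1) (y - d.2) (fun a b => pyAt grid a b = some '@')
-- A's gather loop is the same sum with positive offsets
lemma pvGather (grid : List String) (rows cols r c : Int) :
    DIRECTIONS.foldl (fun neighbor d =>
        if r + d.1 ≥ 0 ∧ r + d.1 < rows ∧ c + d.2 ≥ 0 ∧ c + d.2 < cols then
          if pyAt grid (r + d.1) (c + d.2) = some '@' then neighbor + 1 else neighbor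
        else neighbor) 0
      = (DIRECTIONS.map (fun d => pvHit grid rows cols (r + d.1) (c + d.2))).sum := by
  rw [PySem.List.foldl_congr_mem DIRECTIONS _
        (fun neighbor d => neighbor + pvHit grid rows cols (r + d.1) (c + d.2)) 0
        (by
          intro acc d _
          simp only [pvHit]
          by_cases hb : r + d.1 ≥ 0 ∧ r + d.1 < rows ∧ c + d.2 ≥ 0 ∧ c + d.2 < cols
          · rw [if_pos hb]
            by_cases ha : pyAt grid (r + d.1) (c + d.2) = some '@'
            · rw [if_pos ha, if_pos ⟨hb.1, hb.2.1, hb.2.2.1, hb.2.2.2, ha⟩]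
            · rw [if_neg ha, if_neg (fun h => ha h.2.2.2.2)]; ring
          · rw [if_neg hb, if_neg (fun h => hb ⟨h.1, h.2.1, h.2.2.1, h.2.2.2.1⟩)]; ring)]
  rw [PySem.List.foldl_add]
  ring

-- the offset list is closed under negation
lemma pvNegSum (f : Int × Int → Int) :
    (DIRECTIONS.map (fun d => f (-d.1, -d.2))).sum = (DIRECTIONS.map f).sum := by
  have hperm : (DIRECTIONS.map (fun d : Int × Int => (-d.1, -d.2))).Perm DIRECTIONS := by decide
  calc (DIRECTIONS.map (fun d => f (-d.1, -d.2))).sum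
      = ((DIRECTIONS.map (fun d : Int × Int => (-d.1, -d.2))).map f).sum := by
        rw [List.map_map]; rfl
    _ = (DIRECTIONS.map f).sum := ((hperm.map f).sum_eq)

-- ===== VERDICT (by name: the statement is the Claim_ definition above) =====
theorem count_accessible_spec : Claim_equal_count_accessible := by
  intro grid _ _
  unfold Spec_count_accessible
  obtain ⟨m, hm⟩ : ∃ m : Nat, PySem.Str.len ((PySem.List.pyGet? grid 0).getD "") = (m : Int) :=
    ⟨((PySem.List.pyGet? grid 0).getD "").toList.length, by simp [PySem.Str.len]⟩
  simp only [count_accessible, count_accessible_alt, hm,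
    PySem.List.pyRange_zero_natCast, List.foldl_map]
  have hkey : ∀ r c : Int,
      (DIRECTIONS.foldl (fun (neighbor : Int) d =>
          if r + d.1 ≥ 0 ∧ r + d.1 < ((grid.length : Nat) : Int) ∧
              c + d.2 ≥ 0 ∧ c + d.2 < (m : Int) then
            if pyAt grid (r + d.1) (c + d.2) = some '@' then neighbor + 1 else neighbor
          else neighbor) 0)
        = ((List.range grid.length).foldl (fun cnt (i : Nat) =>
            (List.range m).foldl (fun cnt (j : Nat) =>
              if pyAt grid (i : Int) (j : Int) = some '@' then
                DIRECTIONS.foldl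
                  (fun cnt d => cnt.modify ((i : Int) + d.1, (j : Int) + d.2) 0 (· + 1)) cnt
              else cnt) cnt) PySem.Dict.empty).getD (r, c) 0 := by
    intro r c
    rw [pvGather, pvScatter]
    calc (DIRECTIONS.map (fun d =>
            pvHit grid ((grid.length : Nat) : Int) (m : Int) (r + d.1) (c + d.2))).sum
        = (DIRECTIONS.map (fun d =>
            (fun e : Int × Int => pvHit grid ((grid.length : Nat) : Int) (m : Int)
              (r - e.1) (c - e.2)) (-d.1, -d.2))).sum := by
          apply congrArg List.sum
          apply List.map_congr_left
          intro d _
          show pvHit _ _ _ (r + d.1) (c + d.2) = pvHit _ _ _ (r - -d.1) (c - -d.2)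
          congr 1 <;> ring
      _ = (DIRECTIONS.map (fun e : Int × Int =>
            pvHit grid ((grid.length : Nat) : Int) (m : Int) (r - e.1) (c - e.2))).sum :=
          pvNegSum (fun e : Int × Int => pvHit grid ((grid.length : Nat) : Int) ((m : Nat) : Int) (r - e.1) (c - e.2))
  apply PySem.List.foldl_congr_mem
  intro acc i _
  apply PySem.List.foldl_congr_mem
  intro acc2 j _
  by_cases hat : pyAt grid (i : Int) (j : Int) = some '@'
  · rw [if_neg (by simpa using hat), hkey (i : Int) (j : Int)]
    split_ifs with h1 h2 <;> first | rfl | (exfalso; tauto)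
  · rw [if_pos hat, if_neg (fun h => hat h.1)]
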